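-- pv_equiv track=rewrite | github.com/gadicohen93/action-grounding | src/simulate.py | format_chat_qwen
-- ===== SOURCE A (Python) =====
-- def format_chat_qwen(system_prompt: str, user_turns: list[str]) -> str:
--     """Format chat for Qwen (ChatML format)."""
--     text = f"<|im_start|>system\n{system_prompt}<|im_end|>\n"
--
--     for i, user_msg in enumerate(user_turns):
--         text += f"<|im_start|>user\n{user_msg}<|im_end|>\n"
--         if i < len(user_turns) - 1:
--             text += f"<|im_start|>assistant\nI understand. Let me help you with that.<|im_end|>\n"
--
--     text += "<|im_start|>assistant\n"
--     return text
-- ===== SOURCE B (Python) =====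
-- def format_chat_qwen(system_prompt: str, user_turns: list[str]) -> str:
--     """Format chat for Qwen (ChatML format), built back-to-front.
--
--     The suffix is assembled from the final assistant tag backwards over the
--     turns in reverse order; only the last turn (seen first) omits the
--     assistant placeholder, so no index arithmetic is needed.
--     """
--     assist = "<|im_start|>assistant\nI understand. Let me help you with that.<|im_end|>\n"
--     suffix = "<|im_start|>assistant\n"
--     is_last = True
--     for m in reversed(user_turns):
--         block = f"<|im_start|>user\n{m}<|im_end|>\n"
--         if is_last:
--             suffix = block + suffix
--             is_last = False
--         else:
--             suffix = block + assist + suffix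
--     return f"<|im_start|>system\n{system_prompt}<|im_end|>\n" + suffix
-- ===== Notes on version B (the rewrite author's own statement) =====
-- stated objective: alternative
-- what changed: Builds the result back-to-front: a single pass over reversed(user_turns) grows a suffix string from the final assistant tag, a boolean flag (not index arithmetic) making only the last turn skip the assistant placeholder.
import Mathlib
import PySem

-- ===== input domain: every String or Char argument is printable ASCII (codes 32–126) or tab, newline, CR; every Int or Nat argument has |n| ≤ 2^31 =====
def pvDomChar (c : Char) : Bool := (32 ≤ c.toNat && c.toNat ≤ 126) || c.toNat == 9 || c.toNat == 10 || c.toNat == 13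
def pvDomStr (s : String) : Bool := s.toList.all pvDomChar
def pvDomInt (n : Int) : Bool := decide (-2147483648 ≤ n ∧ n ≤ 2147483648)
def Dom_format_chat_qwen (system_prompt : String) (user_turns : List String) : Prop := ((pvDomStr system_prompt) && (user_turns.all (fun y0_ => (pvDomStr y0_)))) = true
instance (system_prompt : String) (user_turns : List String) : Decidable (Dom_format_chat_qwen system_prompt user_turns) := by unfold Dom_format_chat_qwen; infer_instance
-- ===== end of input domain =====

-- B assembles the transcript back-to-front (reverse pass growing a suffix, a flag marking the
-- last turn) instead of A's forward indexed accumulation; same output, an alternative decomposition.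

-- ===== PORT A =====
-- literal transliteration of A: accumulate into `text`, enumerate with index, append the
-- assistant placeholder only when i < len(user_turns) - 1, then append the final tag.
def format_chat_qwen (system_prompt : String) (user_turns : List String) : String :=
  let text := "<|im_start|>system\n" ++ system_prompt ++ "<|im_end|>\n"
  let text := (PySem.List.enumerate user_turns 0).foldl
    (fun text p =>
      let text := text ++ ("<|im_start|>user\n" ++ p.2 ++ "<|im_end|>\n")
      if p.1 < (user_turns.length : Int) - 1 then
        text ++ "<|im_start|>assistant\nI understand. Let me help you with that.<|im_end|>\n"
      else text)
    text
  text ++ "<|im_start|>assistant\n"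

-- ===== PORT B =====
-- literal transliteration of B: fold over the reversed turn list with state (suffix, is_last),
-- prepending each block (and, except for the last turn, the assistant placeholder) to the suffix.
def format_chat_qwen_alt (system_prompt : String) (user_turns : List String) : String :=
  let assist := "<|im_start|>assistant\nI understand. Let me help you with that.<|im_end|>\n"
  let st := user_turns.reverse.foldl
    (fun (st : String × Bool) m =>
      let block := "<|im_start|>user\n" ++ m ++ "<|im_end|>\n"
      if st.2 then (block ++ st.1, false)
      else (block ++ assist ++ st.1, false))
    ("<|im_start|>assistant\n", true)
  "<|im_start|>system\n" ++ system_prompt ++ "<|im_end|>\n" ++ st.1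

-- ===== PRECONDITION & SPEC =====
def Spec_format_chat_qwen (system_prompt : String) (user_turns : List String) (out : String) : Prop := out = format_chat_qwen_alt system_prompt user_turns
instance (system_prompt : String) (user_turns : List String) (out : String) : Decidable (Spec_format_chat_qwen system_prompt user_turns out) := by unfold Spec_format_chat_qwen; infer_instance

-- ===== CLAIM =====
def Claim_equal_format_chat_qwen : Prop := ∀ (system_prompt : String) (user_turns : List String), Dom_format_chat_qwen system_prompt user_turns → Spec_format_chat_qwen system_prompt user_turns (format_chat_qwen system_prompt user_turns)

-- ===== LEMMAS AND PROOFS =====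

-- Proof-only middle ground: the whole suffix after the system header, by structural recursion.
def pvSuffix : List String → String
  | [] => "<|im_start|>assistant\n"
  | [m] => "<|im_start|>user\n" ++ m ++ "<|im_end|>\n" ++ "<|im_start|>assistant\n"
  | m :: rest =>
      "<|im_start|>user\n" ++ m ++ "<|im_end|>\n"
        ++ "<|im_start|>assistant\nI understand. Let me help you with that.<|im_end|>\n"
        ++ pvSuffix rest

-- A-side invariant: the enumerate-fold over a suffix starting at index k (k + len = n),
-- followed by the final tag, appends exactly pvSuffix of that suffix.
theorem loopA_eq (n : Int) (xs : List String) : ∀ (k : Int) (acc : String),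
    k + (xs.length : Int) = n →
    (PySem.List.enumerate xs k).foldl
      (fun text p =>
        let text := text ++ ("<|im_start|>user\n" ++ p.2 ++ "<|im_end|>\n")
        if p.1 < n - 1 then
          text ++ "<|im_start|>assistant\nI understand. Let me help you with that.<|im_end|>\n"
        else text)
      acc
      ++ "<|im_start|>assistant\n"
    = acc ++ pvSuffix xs := by
  induction xs with
  | nil =>
    intro k acc _
    simp [PySem.List.enumerate, pvSuffix]
  | cons x xs ih =>
    intro k acc h
    rw [PySem.List.enumerate_cons, List.foldl_cons]
    cases xs with
    | nil =>
      have hk : ¬ (k < n - 1) := by simp at h; omega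
      simp [PySem.List.enumerate, pvSuffix, hk, String.append_assoc]
    | cons y ys =>
      have hk : k < n - 1 := by simp at h; omega
      rw [ih (k + 1) _ (by simp at h ⊢; omega)]
      simp only [pvSuffix, hk, if_pos, String.append_assoc]

-- B-side invariant: the reverse fold computes (pvSuffix xs, xs == []).
theorem loopB_eq (xs : List String) :
    xs.reverse.foldl
      (fun (st : String × Bool) m =>
        let block := "<|im_start|>user\n" ++ m ++ "<|im_end|>\n"
        if st.2 then (block ++ st.1, false)
        else (block ++ "<|im_start|>assistant\nI understand. Let me help you with that.<|im_end|>\n" ++ st.1, false))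
      ("<|im_start|>assistant\n", true)
    = (pvSuffix xs, xs.isEmpty) := by
  rw [List.foldl_reverse]
  induction xs with
  | nil => simp [pvSuffix]
  | cons x xs ih =>
    rw [List.foldr_cons, ih]
    cases xs with
    | nil => simp [pvSuffix]
    | cons y ys => simp [pvSuffix, String.append_assoc]

-- ===== VERDICT =====
theorem format_chat_qwen_spec : Claim_equal_format_chat_qwen := by
  intro system_prompt user_turns _
  unfold Spec_format_chat_qwen format_chat_qwen format_chat_qwen_alt
  dsimp only
  rw [loopB_eq, ← loopA_eq (user_turns.length : Int) user_turns 0 _ (by simp),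
    String.append_assoc]
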